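-- pv_equiv track=rewrite | github.com/edugdl/paradigmas | sudoku.py | limite
-- ===== SOURCE A (Python) =====
-- def limite(posicao, comparacao, visitados, comp):
--     """
--     Função que aplica uma DFS (busca em largura) pelos símbolos de '<' ou '>'.
--     Dessa maneira é possível verificar a quantidade de elementos que a célula deve ser menor, ou maior.
--     Dada 3 células do sudoku m, n e o. Se m > n > o, m não pode ser 1 nem 2, apenas valores > 3 satisfazem a inequação.
--     Assim, verificamos os limites superiores e inferiores de uma célula no sudoku, reduzindo a complexidade do algoritmo.
--
--     @param: posição                     Posição em que o elemento será posicionado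
--     @param: matriz comparação           Matriz de 81 listas de 4 elementos, que representa os sinais de maior e menor
--     @param: elementos visitados         Lista que contém todos os elementos já visitados na busca em profundidade
--     @param: comparação da busca         Admite apenas duas entrada = 0 ou 1, pois representa qual busca deseja se fazer, pelo símbolo '<' ou '>'
--     @return: total                      Quantidade de células do sudokus visitadas a partir do elemento de comparação
--     """
--     total = 1
--     visitados.append(posicao)
--     if comparacao[posicao][0] == comp and posicao-9 not in visitados:
--         total += limite(posicao-9, comparacao, visitados, comp)
--
--     if comparacao[posicao][1] == comp and posicao+1 not in visitados:
--         total += limite(posicao+1, comparacao, visitados, comp)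
--
--     if comparacao[posicao][2] == comp and posicao+9 not in visitados:
--         total += limite(posicao+9, comparacao, visitados, comp)
--
--     if comparacao[posicao][3] == comp and posicao-1 not in visitados:
--         total += limite(posicao-1, comparacao, visitados, comp)
--
--     return total
-- ===== SOURCE B (Python) =====
-- def limite(posicao, comparacao, visitados, comp):
--     """Iterative DFS with an explicit stack of (cell, next-direction) frames
--     instead of recursion; same return value and same mutation of visitados."""
--     total = 1
--     visitados.append(posicao)
--     stack = [(posicao, 0)]
--     while stack:
--         p, d = stack.pop()
--         if d == 4:
--             continue
--         stack.append((p, d + 1))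
--         if comparacao[p][d] == comp:
--             q = (p - 9, p + 1, p + 9, p - 1)[d]
--             if q not in visitados:
--                 total += 1
--                 visitados.append(q)
--                 stack.append((q, 0))
--     return total
-- ===== Notes on version B (the rewrite author's own statement) =====
-- stated objective: alternative
-- what changed: The recursive DFS over inequality signs is replaced by an iterative loop driven by an explicit stack of (cell, next-direction) frames, reproducing the same visit order, total and mutation of visitados without recursion.
-- outside the precondition, e.g. on limite(0, [[0, 0, 0, 1], [0, 0, 0, 0]], [], 1): A returns 2, B returns 2; on limite(0, [[0, 0, 0, 0], [7]], [], 1): A returns 1, B returns 1; on limite(0, [[0, 0, 0, 0], [1, 1, 1, 1]], [], 1): A returns 1, B returns 1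
import Mathlib
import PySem

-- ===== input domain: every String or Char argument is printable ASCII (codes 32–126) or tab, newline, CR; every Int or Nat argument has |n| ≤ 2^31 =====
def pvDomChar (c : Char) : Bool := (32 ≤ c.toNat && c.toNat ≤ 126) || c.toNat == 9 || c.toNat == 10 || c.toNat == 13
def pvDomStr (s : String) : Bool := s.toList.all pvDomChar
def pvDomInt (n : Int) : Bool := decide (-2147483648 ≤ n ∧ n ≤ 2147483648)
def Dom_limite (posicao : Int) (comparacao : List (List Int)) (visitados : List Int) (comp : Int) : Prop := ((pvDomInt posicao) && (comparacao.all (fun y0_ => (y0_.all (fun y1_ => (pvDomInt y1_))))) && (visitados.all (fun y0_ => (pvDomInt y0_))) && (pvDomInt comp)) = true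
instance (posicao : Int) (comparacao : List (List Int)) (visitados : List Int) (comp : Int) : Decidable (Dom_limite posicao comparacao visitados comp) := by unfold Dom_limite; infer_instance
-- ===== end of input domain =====

-- B replaces the recursive DFS by an iterative explicit-stack loop (same return value and the
-- same in-place appends to `visitados`; the equivalence proved here is about the return value).


-- ===== PORT A =====
-- A is a recursive DFS that mutates `visitados`; the port threads the list as state and
-- returns (total, visitados').  Python recursion has no fuel: the Nat argument is only a
-- totality guard (none = fuel ran out, which under Pre_limite never happens, or an
-- IndexError of Python).  The four identically-shaped `if` blocks of A are the four
-- `dirStepA` steps, in A's order; Python re-evaluates `comparacao[posicao]` in each `if`,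
-- which yields the same row `r` each time.
mutual
def limiteA : Nat → Int → List (List Int) → List Int → Int → Option (Int × List Int)
  | 0, _, _, _, _ => none
  | fa+1, pos, cz, vis, comp =>
    (PySem.List.pyGet? cz pos).bind fun r =>
    (PySem.List.pyGet? r 0).bind fun c0 =>
    (dirStepA fa (pos - 9) cz comp c0 (1, vis ++ [pos])).bind fun s1 =>
    (PySem.List.pyGet? r 1).bind fun c1 =>
    (dirStepA fa (pos + 1) cz comp c1 s1).bind fun s2 =>
    (PySem.List.pyGet? r 2).bind fun c2 =>
    (dirStepA fa (pos + 9) cz comp c2 s2).bind fun s3 =>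
    (PySem.List.pyGet? r 3).bind fun c3 =>
    dirStepA fa (pos - 1) cz comp c3 s3
termination_by fa _ _ _ _ => (fa, 0)

-- one `if comparacao[posicao][d] == comp and q not in visitados: total += limite(q, …)` block
def dirStepA (fa : Nat) (q : Int) (cz : List (List Int)) (comp c : Int) (s : Int × List Int) : Option (Int × List Int) :=
  if c = comp ∧ q ∉ s.2 then (limiteA fa q cz s.2 comp).map (fun u => (s.1 + u.1, u.2)) else some s
termination_by (fa, 1)
end

def limite (posicao : Int) (comparacao : List (List Int)) (visitados : List Int) (comp : Int) : Int :=
  match limiteA (2 * comparacao.length + 2) posicao comparacao visitados comp with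
  | some s => s.1
  | none => 0

-- ===== PORT B =====
-- B is an iterative DFS over a stack of (cell, next-direction) frames; the Lean list holds
-- the Python stack top-first (Python's stack.pop() pops the last element).  The tuple
-- lookup (p-9, p+1, p+9, p-1)[d] is the if-chain dirTarget.
def dirTarget (p : Int) (d : Nat) : Int :=
  if d = 0 then p - 9 else if d = 1 then p + 1 else if d = 2 then p + 9 else p - 1

def loopB : Nat → List (Int × Nat) → Int → List (List Int) → List Int → Int → Option (Int × List Int)
  | 0, _, _, _, _, _ => none
  | fb+1, stack, total, cz, vis, comp =>
    match stack with
    | [] => some (total, vis)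
    | (p, d) :: rest =>
      if d = 4 then loopB fb rest total cz vis comp
      else
        (PySem.List.pyGet? cz p).bind fun r =>
        (PySem.List.pyGet? r (d : Int)).bind fun c =>
        if c = comp ∧ dirTarget p d ∉ vis then
          loopB fb ((dirTarget p d, 0) :: (p, d+1) :: rest) (total + 1) cz (vis ++ [dirTarget p d]) comp
        else
          loopB fb ((p, d+1) :: rest) total cz vis comp

def limite_alt (posicao : Int) (comparacao : List (List Int)) (visitados : List Int) (comp : Int) : Int :=
  match loopB (10 * comparacao.length + 6) [(posicao, 0)] 1 comparacao (visitados ++ [posicao]) comp with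
  | some s => s.1
  | none => 0

-- ===== PRECONDITION & SPEC =====
-- Pre_limite is the intended grid domain: the start cell indexes `comparacao` (Python allows
-- -len ≤ posicao < len), every row has the four direction entries, and no row whose
-- up/right/down/left neighbour would fall outside the list carries a sign equal to `comp`
-- in that direction (for a 9×9 sudoku: no outward sign on a border cell).  This guarantees
-- the DFS never raises an IndexError.  It is narrower than the exact set of inputs on which
-- A returns: A also returns when an off-grid sign merely is never reached by the search
-- (including via Python's negative-index wraparound) — B returns the same value there.
def Pre_limite (posicao : Int) (comparacao : List (List Int)) (visitados : List Int) (comp : Int) : Prop :=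
  (-(comparacao.length : Int) ≤ posicao ∧ posicao < comparacao.length) ∧
  ∀ i ∈ List.range comparacao.length,
    4 ≤ (comparacao.getD i []).length ∧
    (i < 9 → (comparacao.getD i []).getD 0 0 ≠ comp) ∧
    (comparacao.length ≤ i + 9 → (comparacao.getD i []).getD 2 0 ≠ comp) ∧
    (i + 1 = comparacao.length → (comparacao.getD i []).getD 1 0 ≠ comp) ∧
    (i = 0 → (comparacao.getD i []).getD 3 0 ≠ comp)

instance (posicao : Int) (comparacao : List (List Int)) (visitados : List Int) (comp : Int) : Decidable (Pre_limite posicao comparacao visitados comp) := by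
  unfold Pre_limite; infer_instance

def pvWitness_limite : Int × List (List Int) × List Int × Int := (0, [[0, 0, 0, 0]], [], 1)

def Spec_limite (posicao : Int) (comparacao : List (List Int)) (visitados : List Int) (comp : Int) (out : Int) : Prop := out = limite_alt posicao comparacao visitados comp
instance (posicao : Int) (comparacao : List (List Int)) (visitados : List Int) (comp : Int) (out : Int) : Decidable (Spec_limite posicao comparacao visitados comp out) := by unfold Spec_limite; infer_instance

-- ===== CLAIM (what is proved, stated in full; the proofs are below) =====
def Claim_equal_limite : Prop := ∀ (posicao : Int) (comparacao : List (List Int)) (visitados : List Int) (comp : Int), Dom_limite posicao comparacao visitados comp → Pre_limite posicao comparacao visitados comp → Spec_limite posicao comparacao visitados comp (limite posicao comparacao visitados comp)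

-- ===== LEMMAS AND PROOFS =====

-- position p is a valid (possibly negative) Python index into cz
def InR (cz : List (List Int)) (p : Int) : Prop := -(cz.length : Int) ≤ p ∧ p < cz.length

-- the rows part of Pre_limite
def RowsOK (cz : List (List Int)) (comp : Int) : Prop :=
  ∀ i ∈ List.range cz.length,
    4 ≤ (cz.getD i []).length ∧
    (i < 9 → (cz.getD i []).getD 0 0 ≠ comp) ∧
    (cz.length ≤ i + 9 → (cz.getD i []).getD 2 0 ≠ comp) ∧
    (i + 1 = cz.length → (cz.getD i []).getD 1 0 ≠ comp) ∧
    (i = 0 → (cz.getD i []).getD 3 0 ≠ comp)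

-- number of still-unvisited valid positions (the DFS termination measure)
def mUn (cz : List (List Int)) (vis : List Int) : Nat :=
  ((Finset.range (2 * cz.length)).filter (fun j : Nat => ((j : Int) - (cz.length : Int)) ∉ vis)).card

lemma mUn_le (cz : List (List Int)) (vis : List Int) : mUn cz vis ≤ 2 * cz.length := by
  unfold mUn
  exact le_trans (Finset.card_filter_le _ _) (by simp)

lemma mUn_append_new {cz : List (List Int)} {vis : List Int} {p : Int}
    (hr : InR cz p) (hnv : p ∉ vis) : mUn cz (vis ++ [p]) + 1 = mUn cz vis := by
  obtain ⟨h1, h2⟩ := hr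
  unfold mUn
  have hj0 : (((p + cz.length).toNat : Nat) : Int) = p + cz.length := Int.toNat_of_nonneg (by omega)
  have hset : (Finset.range (2 * cz.length)).filter (fun j : Nat => ((j : Int) - (cz.length : Int)) ∉ vis ++ [p])
      = ((Finset.range (2 * cz.length)).filter (fun j : Nat => ((j : Int) - (cz.length : Int)) ∉ vis)).erase (p + cz.length).toNat := by
    ext j
    simp only [Finset.mem_filter, Finset.mem_erase, Finset.mem_range, List.mem_append,
      List.mem_singleton]
    constructor
    · rintro ⟨hjr, hj⟩
      push Not at hj
      exact ⟨by intro he; subst he; exact hj.2 (by omega), hjr, hj.1⟩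
    · rintro ⟨hne, hjr, hj⟩
      refine ⟨hjr, ?_⟩
      push Not
      exact ⟨hj, by intro he; apply hne; omega⟩
  rw [hset]
  have hmem : (p + cz.length).toNat ∈ (Finset.range (2 * cz.length)).filter (fun j : Nat => ((j : Int) - (cz.length : Int)) ∉ vis) := by
    simp only [Finset.mem_filter, Finset.mem_range]
    refine ⟨by omega, ?_⟩
    have he : (((p + cz.length).toNat : Nat) : Int) - (cz.length : Int) = p := by omega
    rw [he]; exact hnv
  rw [Finset.card_erase_of_mem hmem]
  have hpos := Finset.card_pos.mpr ⟨_, hmem⟩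
  omega

lemma pyGet?_wrap {α : Type} [Inhabited α] (xs : List α) (p : Int)
    (h1 : -(xs.length : Int) ≤ p) (h2 : p < xs.length) :
    ∃ i : Nat, i < xs.length ∧ ((i : Int) = p ∨ (i : Int) = p + xs.length) ∧
      PySem.List.pyGet? xs p = xs[i]? := by
  by_cases hp : 0 ≤ p
  · refine ⟨p.toNat, by omega, Or.inl (by omega), ?_⟩
    rw [PySem.List.pyGet?_of_nonneg xs hp]
  · have hk : p = -(((-p).toNat : Nat) : Int) := by omega
    refine ⟨xs.length - (-p).toNat, by omega, Or.inr (by omega), ?_⟩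
    rw [hk, PySem.List.pyGet?_neg_natCast xs (-p).toNat (by omega) (by omega)]
    congr 1
    omega

lemma neighbors_ok {cz : List (List Int)} {comp pos : Int} {r : List Int}
    (hRows : RowsOK cz comp) (hpos : InR cz pos)
    (hget : PySem.List.pyGet? cz pos = some r) :
    4 ≤ r.length ∧
    (r.getD 0 0 = comp → InR cz (pos - 9)) ∧
    (r.getD 1 0 = comp → InR cz (pos + 1)) ∧
    (r.getD 2 0 = comp → InR cz (pos + 9)) ∧
    (r.getD 3 0 = comp → InR cz (pos - 1)) := by
  obtain ⟨i, hi, hcase, hidx⟩ := pyGet?_wrap cz pos hpos.1 hpos.2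
  rw [hidx, List.getElem?_eq_getElem hi] at hget
  have hri : cz[i] = r := by exact Option.some.inj hget
  have hgd : cz.getD i [] = r := by rw [List.getD_eq_getElem cz [] hi, hri]
  have hP := hRows i (by simpa using hi)
  rw [hgd] at hP
  obtain ⟨hlen, h0, h2, h1, h3⟩ := hP
  refine ⟨hlen, fun hcmp => ?_, fun hcmp => ?_, fun hcmp => ?_, fun hcmp => ?_⟩ <;> unfold InR
  · have h9 : ¬ i < 9 := fun hlt => h0 hlt hcmp
    rcases hcase with h | h <;> exact ⟨by omega, by omega⟩
  · have h9 : ¬ (i + 1 = cz.length) := fun hlt => h1 hlt hcmp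
    rcases hcase with h | h <;> exact ⟨by omega, by omega⟩
  · have h9 : ¬ (cz.length ≤ i + 9) := fun hlt => h2 hlt hcmp
    rcases hcase with h | h <;> exact ⟨by omega, by omega⟩
  · have h9 : ¬ (i = 0) := fun hlt => h3 hlt hcmp
    rcases hcase with h | h <;> exact ⟨by omega, by omega⟩

lemma pyGet?_entry (r : List Int) (d : Nat) (h : d < r.length) :
    PySem.List.pyGet? r (d : Int) = some (r.getD d 0) := by
  rw [PySem.List.pyGet?_natCast, List.getElem?_eq_getElem h, List.getD_eq_getElem r 0 h]

-- inversion of one unfolding of limiteA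
lemma limiteA_succ_inv {fa : Nat} {pos : Int} {cz : List (List Int)} {vis : List Int} {comp t : Int} {vis' : List Int}
    (h : limiteA (fa+1) pos cz vis comp = some (t, vis')) :
    ∃ r c0 c1 c2 c3 s1 s2 s3,
      PySem.List.pyGet? cz pos = some r ∧
      PySem.List.pyGet? r 0 = some c0 ∧ PySem.List.pyGet? r 1 = some c1 ∧
      PySem.List.pyGet? r 2 = some c2 ∧ PySem.List.pyGet? r 3 = some c3 ∧
      dirStepA fa (pos - 9) cz comp c0 (1, vis ++ [pos]) = some s1 ∧
      dirStepA fa (pos + 1) cz comp c1 s1 = some s2 ∧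
      dirStepA fa (pos + 9) cz comp c2 s2 = some s3 ∧
      dirStepA fa (pos - 1) cz comp c3 s3 = some (t, vis') := by
  simp only [limiteA, Option.bind_eq_some_iff] at h
  obtain ⟨r, hr, c0, hc0, s1, hs1, c1, hc1, s2, hs2, c2, hc2, s3, hs3, c3, hc3, h4⟩ := h
  exact ⟨r, c0, c1, c2, c3, s1, s2, s3, hr, hc0, hc1, hc2, hc3, hs1, hs2, hs3, h4⟩

lemma dirStepA_inv {fa : Nat} {q : Int} {cz : List (List Int)} {comp c : Int} {s s' : Int × List Int}
    (h : dirStepA fa q cz comp c s = some s') :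
    ((c = comp ∧ q ∉ s.2) ∧ ∃ u v, limiteA fa q cz s.2 comp = some (u, v) ∧ s' = (s.1 + u, v)) ∨
    (¬(c = comp ∧ q ∉ s.2) ∧ s' = s) := by
  by_cases hc : c = comp ∧ q ∉ s.2
  · left
    rw [dirStepA, if_pos hc] at h
    obtain ⟨⟨u, v⟩, hu, hs'⟩ := Option.map_eq_some_iff.mp h
    exact ⟨hc, u, v, hu, hs'.symm⟩
  · right
    rw [dirStepA, if_neg hc] at h
    exact ⟨hc, (Option.some.inj h).symm⟩

-- totals are positive / step totals are monotone
lemma Apos (fa : Nat) :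
    (∀ pos cz vis comp t vis', limiteA fa pos cz vis comp = some (t, vis') → 1 ≤ t) ∧
    (∀ q cz comp c s s', dirStepA fa q cz comp c s = some s' → s.1 ≤ s'.1) := by
  induction fa with
  | zero =>
    refine ⟨fun pos cz vis comp t vis' h => by simp [limiteA] at h, ?_⟩
    intro q cz comp c s s' h
    rcases dirStepA_inv h with ⟨_, u, v, hu, _⟩ | ⟨_, hs⟩
    · simp [limiteA] at hu
    · subst hs; exact le_refl _
  | succ fa ih =>
    have hA : ∀ (pos : Int) (cz : List (List Int)) (vis : List Int) (comp t : Int) (vis' : List Int),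
        limiteA (fa+1) pos cz vis comp = some (t, vis') → 1 ≤ t := by
      intro pos cz vis comp t vis' h
      obtain ⟨r, c0, c1, c2, c3, s1, s2, s3, hr, h0, h1, h2, h3, hd0, hd1, hd2, hd3⟩ :=
        limiteA_succ_inv h
      have g0 : (1 : Int) ≤ s1.1 := ih.2 _ _ _ _ _ _ hd0
      have g1 : s1.1 ≤ s2.1 := ih.2 _ _ _ _ _ _ hd1
      have g2 : s2.1 ≤ s3.1 := ih.2 _ _ _ _ _ _ hd2
      have g3 : s3.1 ≤ t := ih.2 _ _ _ _ _ _ hd3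
      omega
    refine ⟨hA, ?_⟩
    intro q cz comp c s s' h
    rcases dirStepA_inv h with ⟨_, u, v, hu, hs⟩ | ⟨_, hs⟩
    · subst hs
      have := hA _ _ _ _ _ _ hu
      simp only []
      omega
    · subst hs; exact le_refl _

-- one direction step preserves the DFS invariant (T's per-step lemma)
lemma TStep {cz : List (List Int)} {comp : Int} (k : Nat)
    (IH : ∀ pos vis, InR cz pos → mUn cz (vis ++ [pos]) < k →
      ∃ t vis', limiteA k pos cz vis comp = some (t, vis') ∧ 1 ≤ t ∧
        (∀ x ∈ vis ++ [pos], x ∈ vis') ∧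
        (t + (mUn cz vis' : Int) ≤ 1 + (mUn cz (vis ++ [pos]) : Int)))
    (q c : Int) (hq : c = comp → InR cz q) (s : Int × List Int)
    (hmk : mUn cz s.2 ≤ k) (_hs1 : 1 ≤ s.1) :
    ∃ s', dirStepA k q cz comp c s = some s' ∧ s.1 ≤ s'.1 ∧
      (∀ x ∈ s.2, x ∈ s'.2) ∧
      (s'.1 + (mUn cz s'.2 : Int) ≤ s.1 + (mUn cz s.2 : Int)) := by
  by_cases hc : c = comp ∧ q ∉ s.2
  · have hq' := hq hc.1
    have hm := mUn_append_new hq' hc.2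
    obtain ⟨u, v, hu, hu1, hmemu, haccu⟩ := IH q s.2 hq' (by omega)
    refine ⟨(s.1 + u, v), ?_, by simp only []; omega, ?_, ?_⟩
    · rw [dirStepA, if_pos hc, hu]; rfl
    · intro x hx
      exact hmemu x (by simp [hx])
    · simp only []
      omega
  · exact ⟨s, by rw [dirStepA, if_neg hc], le_refl _, fun x hx => hx, by omega⟩

-- under Pre_, A's recursion succeeds at any fuel above the number of unvisited cells
lemma TS : ∀ k : Nat, ∀ (pos : Int) (cz : List (List Int)) (vis : List Int) (comp : Int),
    RowsOK cz comp → InR cz pos → mUn cz (vis ++ [pos]) < k →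
    ∃ t vis', limiteA k pos cz vis comp = some (t, vis') ∧ 1 ≤ t ∧
      (∀ x ∈ vis ++ [pos], x ∈ vis') ∧
      (t + (mUn cz vis' : Int) ≤ 1 + (mUn cz (vis ++ [pos]) : Int)) := by
  intro k
  induction k with
  | zero => intro pos cz vis comp _ _ hm; omega
  | succ k ih =>
    intro pos cz vis comp hRows hpos hm
    obtain ⟨i, hi, hcase, hidx⟩ := pyGet?_wrap cz pos hpos.1 hpos.2
    have hget : PySem.List.pyGet? cz pos = some cz[i] := by
      rw [hidx, List.getElem?_eq_getElem hi]
    obtain ⟨hlen, hn0, hn1, hn2, hn3⟩ := neighbors_ok hRows hpos hget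
    have he0 : PySem.List.pyGet? cz[i] 0 = some (cz[i].getD 0 0) := by
      have := pyGet?_entry cz[i] 0 (by omega); simpa using this
    have he1 : PySem.List.pyGet? cz[i] 1 = some (cz[i].getD 1 0) := by
      have := pyGet?_entry cz[i] 1 (by omega); simpa using this
    have he2 : PySem.List.pyGet? cz[i] 2 = some (cz[i].getD 2 0) := by
      have := pyGet?_entry cz[i] 2 (by omega); simpa using this
    have he3 : PySem.List.pyGet? cz[i] 3 = some (cz[i].getD 3 0) := by
      have := pyGet?_entry cz[i] 3 (by omega); simpa using this
    have hmk : mUn cz (vis ++ [pos]) ≤ k := by omega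
    have ih' := fun pos vis => ih pos cz vis comp hRows
    obtain ⟨s1, hstep0, hle0, hsub0, hacc0⟩ :=
      TStep k ih' (pos - 9) (cz[i].getD 0 0) hn0 (1, vis ++ [pos]) hmk le_rfl
    have hle0' : (1 : Int) ≤ s1.1 := hle0
    have hsub0' : ∀ x ∈ vis ++ [pos], x ∈ s1.2 := hsub0
    have hacc0' : s1.1 + (mUn cz s1.2 : Int) ≤ 1 + (mUn cz (vis ++ [pos]) : Int) := hacc0
    obtain ⟨s2, hstep1, hle1, hsub1, hacc1⟩ :=
      TStep k ih' (pos + 1) (cz[i].getD 1 0) hn1 s1 (by omega) (by omega)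
    obtain ⟨s3, hstep2, hle2, hsub2, hacc2⟩ :=
      TStep k ih' (pos + 9) (cz[i].getD 2 0) hn2 s2 (by omega) (by omega)
    obtain ⟨s4, hstep3, hle3, hsub3, hacc3⟩ :=
      TStep k ih' (pos - 1) (cz[i].getD 3 0) hn3 s3 (by omega) (by omega)
    refine ⟨s4.1, s4.2, ?_, by omega, ?_, by omega⟩
    · simp only [limiteA, hget, Option.bind_some, he0, he1, he2, he3, hstep0, hstep1, hstep2,
        hstep3]
    · intro x hx
      exact hsub3 _ (hsub2 _ (hsub1 _ (hsub0' _ hx)))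

-- simulation: processing one frame (p, d) of B equals one dir-step of A (exact fuel count)
lemma SIMStep {cz : List (List Int)} {comp : Int} (fa : Nat)
    (IH : ∀ pos vis t vis' T rest fb res,
      limiteA fa pos cz vis comp = some (t, vis') →
      loopB fb rest (T + t - 1) cz vis' comp = some res →
      loopB (fb + 5 * t.toNat) ((pos, 0) :: rest) T cz (vis ++ [pos]) comp = some res)
    (p : Int) (d : Nat) (hd : d < 4) (r : List Int) (c : Int)
    (hr : PySem.List.pyGet? cz p = some r) (hc : PySem.List.pyGet? r (d : Int) = some c)
    (s s' : Int × List Int) (hstep : dirStepA fa (dirTarget p d) cz comp c s = some s')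
    (T : Int) (rest : List (Int × Nat)) (fb : Nat) (res : Int × List Int)
    (hcont : loopB fb ((p, d+1) :: rest) (T + s'.1 - 1) cz s'.2 comp = some res) :
    loopB (fb + 5 * (s'.1 - s.1).toNat + 1) ((p, d) :: rest) (T + s.1 - 1) cz s.2 comp = some res := by
  rcases dirStepA_inv hstep with ⟨hc2, u, v, hu, hs'⟩ | ⟨hc2, hs'⟩
  · subst hs'
    have hu1 : (1 : Int) ≤ u := (Apos fa).1 _ _ _ _ _ _ hu
    have hΔ : ((s.1 + u, v).1 - s.1).toNat = u.toNat := by simp only []; omega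
    rw [hΔ]
    simp only [loopB]
    rw [if_neg (by omega : ¬ d = 4), hr, Option.bind_some, hc, Option.bind_some,
      if_pos (by exact ⟨hc2.1, hc2.2⟩ : c = comp ∧ dirTarget p d ∉ s.2)]
    have hcont' : loopB fb ((p, d + 1) :: rest) (T + s.1 + u - 1) cz v comp = some res := by
      have e : T + (s.1 + u, v).1 - 1 = T + s.1 + u - 1 := by simp only []; ring
      rw [e] at hcont
      exact hcont
    have := IH (dirTarget p d) s.2 u v (T + s.1) ((p, d + 1) :: rest) fb res hu hcont'
    rw [show T + s.1 - 1 + 1 = T + s.1 from by ring]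
    exact this
  · subst hs'
    simp only [sub_self, Int.toNat_zero, Nat.mul_zero, Nat.add_zero]
    simp only [loopB]
    rw [if_neg (by omega : ¬ d = 4), hr, Option.bind_some, hc, Option.bind_some, if_neg hc2]
    simpa using hcont

-- full simulation: a whole recursive call of A is exactly 5·t frames of B
lemma SIM (fa : Nat) : ∀ (pos : Int) (cz : List (List Int)) (vis : List Int) (comp t : Int) (vis' : List Int)
    (T : Int) (rest : List (Int × Nat)) (fb : Nat) (res : Int × List Int),
    limiteA fa pos cz vis comp = some (t, vis') →
    loopB fb rest (T + t - 1) cz vis' comp = some res →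
    loopB (fb + 5 * t.toNat) ((pos, 0) :: rest) T cz (vis ++ [pos]) comp = some res := by
  induction fa with
  | zero =>
    intro pos cz vis comp t vis' T rest fb res hA _
    simp [limiteA] at hA
  | succ fa ih =>
    intro pos cz vis comp t vis' T rest fb res hA hcont
    obtain ⟨r, c0, c1, c2, c3, s1, s2, s3, hr, h0, h1, h2, h3, hd0, hd1, hd2, hd3⟩ :=
      limiteA_succ_inv hA
    obtain ⟨a1, v1⟩ := s1
    obtain ⟨a2, v2⟩ := s2
    obtain ⟨a3, v3⟩ := s3
    have g0 : (1 : Int) ≤ a1 := (Apos fa).2 _ _ _ _ _ _ hd0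
    have g1 : a1 ≤ a2 := (Apos fa).2 _ _ _ _ _ _ hd1
    have g2 : a2 ≤ a3 := (Apos fa).2 _ _ _ _ _ _ hd2
    have g3 : a3 ≤ t := (Apos fa).2 _ _ _ _ _ _ hd3
    have ihS := fun pos vis => ih pos cz vis comp
    have h4 : loopB (fb + 1) ((pos, 4) :: rest) (T + t - 1) cz vis' comp = some res := by
      simp only [loopB, if_true]
      exact hcont
    have h3' := SIMStep fa ihS pos 3 (by omega) r c3 hr (by exact_mod_cast h3) ⟨a3, v3⟩ (t, vis')
      (by simpa [dirTarget] using hd3) T rest (fb + 1) res h4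
    have h2' := SIMStep fa ihS pos 2 (by omega) r c2 hr (by exact_mod_cast h2) ⟨a2, v2⟩ ⟨a3, v3⟩
      (by simpa [dirTarget] using hd2) T rest _ res h3'
    have h1' := SIMStep fa ihS pos 1 (by omega) r c1 hr (by exact_mod_cast h1) ⟨a1, v1⟩ ⟨a2, v2⟩
      (by simpa [dirTarget] using hd1) T rest _ res h2'
    have h0' := SIMStep fa ihS pos 0 (by omega) r c0 hr (by exact_mod_cast h0) ⟨1, vis ++ [pos]⟩
      ⟨a1, v1⟩ (by simpa [dirTarget] using hd0) T rest _ res h1'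
    rw [show T + (1 : Int) - 1 = T from by ring] at h0'
    have hfuel : fb + 1 + 5 * ((t, vis').1 - a3).toNat + 1 + 5 * (a3 - a2).toNat + 1 +
        5 * (a2 - a1).toNat + 1 + 5 * (a1 - (1 : Int)).toNat + 1 = fb + 5 * t.toNat := by
      simp only [] at *
      omega
    rw [hfuel] at h0'
    exact h0'

-- ===== VERDICT (by name: the statement is the Claim_ definition above) =====
theorem limite_spec : Claim_equal_limite := by
  intro pos cz vis comp _hDom hPre
  unfold Pre_limite at hPre
  obtain ⟨hInR, hRows⟩ := hPre
  have hm : mUn cz (vis ++ [pos]) < 2 * cz.length + 2 := by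
    have := mUn_le cz (vis ++ [pos]); omega
  obtain ⟨t, vis', hA, ht1, _hmem, hacc⟩ := TS (2 * cz.length + 2) pos cz vis comp hRows hInR hm
  have hLa : limite pos cz vis comp = t := by unfold limite; rw [hA]
  have htb : 5 * t.toNat + 1 ≤ 10 * cz.length + 6 := by
    have h1 := mUn_le cz (vis ++ [pos])
    have h2 : (0 : Int) ≤ (mUn cz vis' : Int) := by positivity
    omega
  have hcont : loopB ((10 * cz.length + 6) - 5 * t.toNat) [] (1 + t - 1) cz vis' comp
      = some (1 + t - 1, vis') := by
    rw [show (10 * cz.length + 6) - 5 * t.toNat = (((10 * cz.length + 5) - 5 * t.toNat) + 1) from by omega]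
    simp [loopB]
  have hB := SIM (2 * cz.length + 2) pos cz vis comp t vis' 1 []
    ((10 * cz.length + 6) - 5 * t.toNat) (1 + t - 1, vis') hA hcont
  rw [show ((10 * cz.length + 6) - 5 * t.toNat) + 5 * t.toNat = 10 * cz.length + 6 from by omega] at hB
  unfold Spec_limite limite_alt
  rw [hB, hLa]
  show t = 1 + t - 1
  omega
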